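-- pv_equiv track=rewrite | github.com/waxy-lab/Project_ship-ais | src/ais_to_mqtt/ais_to_mqtt/analyzeData.py | sixbit_to_ascii
-- ===== SOURCE A (Python) =====
-- def sixbit_to_ascii(sixbit_str: str) -> str:
--     """将6位ASCII码转换为普通ASCII字符"""
--     result = []
--     for char in sixbit_str:
--         code = ord(char) - 48
--         if code > 40:
--             code -= 8
--         if 0 <= code <= 63:
--             if code <= 31:
--                 result.append(chr(code + 64))
--             else:
--                 result.append(chr(code))
--     return ''.join(result).strip()
-- ===== SOURCE B (Python) =====
-- # str.translate with a table built once from three contiguous code ranges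
-- # (48..119 -> 64..95, 32..40, 33..63); other ASCII codes are deleted.
-- _TBL = str.maketrans(
--     bytes(range(48, 120)).decode(),
--     (bytes(range(64, 96)) + bytes(range(32, 41)) + bytes(range(33, 64))).decode(),
--     bytes([*range(0, 48), *range(120, 128)]).decode(),
-- )
--
--
-- def sixbit_to_ascii(sixbit_str: str) -> str:
--     """将6位ASCII码转换为普通ASCII字符"""
--     return sixbit_str.translate(_TBL).strip()
-- ===== Notes on version B (the rewrite author's own statement) =====
-- stated objective: idiomatic
-- what changed: A's explicit loop with per-character arithmetic and nested branches is replaced by str.translate with a translation table built once from three contiguous code-point ranges via str.maketrans (decoded ranges mapped, the rest of ASCII deleted), so the function body is a single translate-and-strip expression with no loop or branching of its own.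
import Mathlib
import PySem

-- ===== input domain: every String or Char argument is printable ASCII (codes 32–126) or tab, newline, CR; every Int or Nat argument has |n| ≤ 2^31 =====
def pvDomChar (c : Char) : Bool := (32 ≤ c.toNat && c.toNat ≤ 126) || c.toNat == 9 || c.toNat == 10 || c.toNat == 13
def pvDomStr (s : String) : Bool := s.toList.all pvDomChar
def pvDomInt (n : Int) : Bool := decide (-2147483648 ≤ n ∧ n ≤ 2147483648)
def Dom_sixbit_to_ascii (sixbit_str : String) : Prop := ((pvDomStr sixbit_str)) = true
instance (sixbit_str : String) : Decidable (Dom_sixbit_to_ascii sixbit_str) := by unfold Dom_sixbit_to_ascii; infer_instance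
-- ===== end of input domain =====

-- B replaces A's per-character branching loop by str.translate with a table prepared once
-- from three contiguous code ranges (idiomatic table-driven decode; same return value on Dom).

-- ===== PORT A =====
def sixbit_to_ascii (sixbit_str : String) : String :=
  let result := sixbit_str.toList.foldl (fun result char =>
    let code : Int := (char.toNat : Int) - 48
    let code := if code > 40 then code - 8 else code
    if 0 ≤ code ∧ code ≤ 63 then
      if code ≤ 31 then result ++ [Char.ofNat (code + 64).toNat]
      else result ++ [Char.ofNat code.toNat]
    else result) []
  PySem.Str.strip (String.mk result)

-- ===== PORT B =====
-- _TBL: str.maketrans(src, dst, del) is a dict mapping each code point of src to the matching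
-- code point of dst, and each code point of del to None (deletion).
def pvTbl : PySem.Dict Int (Option Int) :=
  PySem.Dict.ofList
    (((PySem.List.pyRange 48 120 1).zip
        (PySem.List.pyRange 64 96 1 ++ PySem.List.pyRange 32 41 1 ++ PySem.List.pyRange 33 64 1)).map
        (fun kv => (kv.1, some kv.2))
     ++ (PySem.List.pyRange 0 48 1 ++ PySem.List.pyRange 120 128 1).map (fun k => (k, (none : Option Int))))

-- str.translate for one character: mapped code → that character, None → deleted,
-- absent from the table → the character itself (exact port of Python's translate rule).
def pvTranslate1 (c : Char) : Option Char :=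
  match pvTbl.get? ((c.toNat : Int)) with
  | some (some d) => some (Char.ofNat d.toNat)
  | some none => none
  | none => some c

def sixbit_to_ascii_alt (sixbit_str : String) : String :=
  PySem.Str.strip (String.mk (sixbit_str.toList.filterMap pvTranslate1))

-- ===== PRECONDITION & SPEC =====
def Spec_sixbit_to_ascii (sixbit_str : String) (out : String) : Prop := out = sixbit_to_ascii_alt sixbit_str
instance (sixbit_str : String) (out : String) : Decidable (Spec_sixbit_to_ascii sixbit_str out) := by unfold Spec_sixbit_to_ascii; infer_instance

-- ===== CLAIM (what is proved, stated in full; the proofs are below) =====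
def Claim_equal_sixbit_to_ascii : Prop := ∀ (sixbit_str : String), Dom_sixbit_to_ascii sixbit_str → Spec_sixbit_to_ascii sixbit_str (sixbit_to_ascii sixbit_str)

-- ===== LEMMAS AND PROOFS =====

-- A's per-character decision as an Option, as a function of the code point
def pvAStep (n : Nat) : Option Char :=
  let code : Int := (n : Int) - 48
  let code := if code > 40 then code - 8 else code
  if 0 ≤ code ∧ code ≤ 63 then
    some (if code ≤ 31 then Char.ofNat (code + 64).toNat else Char.ofNat code.toNat)
  else none

-- on every code point below 128 the table lookup succeeds and agrees with A's branching
set_option maxRecDepth 4000 in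
theorem pv_key : ∀ n : Nat, n < 128 →
    (pvTbl.get? ((n : Int))).isSome = true ∧
    ((pvTbl.get? ((n : Int))).bind id).map (fun d => Char.ofNat d.toNat) = pvAStep n := by
  decide

theorem pv_step_eq (c : Char) (h : c.toNat < 128) : pvTranslate1 c = pvAStep c.toNat := by
  obtain ⟨h1, h2⟩ := pv_key c.toNat h
  unfold pvTranslate1
  rcases hm : pvTbl.get? ((c.toNat : Int)) with _ | (_ | d)
  · rw [hm] at h1; simp at h1
  · rw [hm] at h2; simpa using h2
  · rw [hm] at h2; simpa using h2

theorem pv_fold_eq (l : List Char) (hl : ∀ c ∈ l, c.toNat < 128) (acc : List Char) :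
    l.foldl (fun result char =>
      let code : Int := (char.toNat : Int) - 48
      let code := if code > 40 then code - 8 else code
      if 0 ≤ code ∧ code ≤ 63 then
        if code ≤ 31 then result ++ [Char.ofNat (code + 64).toNat]
        else result ++ [Char.ofNat code.toNat]
      else result) acc
    = acc ++ l.filterMap pvTranslate1 := by
  induction l generalizing acc with
  | nil => simp
  | cons c l ih =>
    rw [List.foldl_cons, List.filterMap_cons,
      pv_step_eq c (hl c (List.mem_cons_self)),
      ih (fun x hx => hl x (List.mem_cons_of_mem _ hx))]
    unfold pvAStep
    dsimp only
    split_ifs <;> simp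

-- ===== VERDICT (by name: the statement is the Claim_ definition above) =====
theorem sixbit_to_ascii_spec : Claim_equal_sixbit_to_ascii := by
  intro s hdom
  have hl : ∀ c ∈ s.toList, c.toNat < 128 := by
    intro c hc
    have := List.all_eq_true.mp hdom c hc
    simp only [pvDomChar, Bool.or_eq_true, Bool.and_eq_true, decide_eq_true_eq, beq_iff_eq] at this
    omega
  show sixbit_to_ascii s = sixbit_to_ascii_alt s
  unfold sixbit_to_ascii sixbit_to_ascii_alt
  rw [pv_fold_eq s.toList hl []]
  rfl
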